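-- pv_equiv track=rewrite | github.com/mtecnic/ctx | src/ctx/escaping.py | unquote_attr
-- ===== SOURCE A (Python) =====
-- def unquote_attr(value: str) -> str:
--     """Unquote and unescape an attribute value."""
--     if not value:
--         return ""
--     if value.startswith('"') and value.endswith('"'):
--         inner = value[1:-1]
--         result = []
--         i = 0
--         while i < len(inner):
--             if inner[i] == "\\" and i + 1 < len(inner):
--                 next_ch = inner[i + 1]
--                 if next_ch == '"':
--                     result.append('"')
--                 elif next_ch == "\\":
--                     result.append("\\")
--                 else:
--                     # all other \X → literal \X
--                     result.append("\\")
--                     result.append(next_ch)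
--                 i += 2
--             else:
--                 result.append(inner[i])
--                 i += 1
--         return "".join(result)
--     return value
-- ===== SOURCE B (Python) =====
-- def unquote_attr(value: str) -> str:
--     """Unquote and unescape an attribute value."""
--     if not value:
--         return ""
--     if value.startswith('"') and value.endswith('"'):
--         inner = value[1:-1]
--         return '\\'.join(seg.replace('\\"', '"') for seg in inner.split('\\\\'))
--     return value
-- ===== Notes on version B (the rewrite author's own statement) =====
-- stated objective: alternative
-- what changed: Replaced the index-based while-loop with two-character lookahead by three staged whole-string operations: split the inner value on double-backslash, replace backslash-quote by quote inside each segment, and join the segments with a single backslash; the left-to-right non-overlapping matching of split/replace reproduces the loop's pairing.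
import Mathlib
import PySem

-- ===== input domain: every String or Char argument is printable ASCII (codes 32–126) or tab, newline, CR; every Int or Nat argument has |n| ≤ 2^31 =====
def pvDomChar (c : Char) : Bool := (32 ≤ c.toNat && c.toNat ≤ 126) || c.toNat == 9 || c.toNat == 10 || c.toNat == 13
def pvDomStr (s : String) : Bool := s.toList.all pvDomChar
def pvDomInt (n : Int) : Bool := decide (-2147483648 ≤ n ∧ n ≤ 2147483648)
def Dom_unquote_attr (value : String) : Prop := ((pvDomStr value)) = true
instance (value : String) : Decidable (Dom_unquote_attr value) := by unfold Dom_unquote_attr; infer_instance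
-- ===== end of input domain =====

-- B replaces A's character-by-character while-loop by three staged whole-string
-- operations: split the inner value on double-backslash, replace backslash-quote by
-- quote inside each segment, join with a single backslash (alternative algorithm).

-- ===== PORT A =====
-- A's while-loop: index i, lookahead at inner[i+1], i advances by 2 on an escape pair.
def unquoteLoopA (inner : List Char) (i : Nat) : List Char :=
  if h : i < inner.length then
    if h2 : inner[i] = '\\' ∧ i + 1 < inner.length then
      (if inner[i+1]'h2.2 = '"' then ['"']
       else if inner[i+1]'h2.2 = '\\' then ['\\']
       else ['\\', inner[i+1]'h2.2]) ++ unquoteLoopA inner (i+2)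
    else
      inner[i] :: unquoteLoopA inner (i+1)
  else []
termination_by inner.length - i

def unquote_attr (value : String) : String :=
  let cs := value.toList
  if cs = [] then ""
  else if PySem.Chars.startswith cs ['"'] && PySem.Chars.endswith cs ['"'] then
    String.ofList (unquoteLoopA (PySem.List.slice cs (some 1) (some (-1))) 0)
  else value

-- ===== PORT B =====
-- hand port of Python str.split('\\\\'): left-to-right non-overlapping, exact
def splitBB : List Char → List (List Char)
  | [] => [[]]
  | [c] => [[c]]
  | c :: d :: rest =>
    if c = '\\' ∧ d = '\\' then [] :: splitBB rest
    else match splitBB (d :: rest) with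
      | [] => [[c]]
      | s :: ss => (c :: s) :: ss

-- hand port of Python str.replace('\\"', '"'): left-to-right non-overlapping, exact
def replEsc : List Char → List Char
  | [] => []
  | [c] => [c]
  | c :: d :: rest =>
    if c = '\\' ∧ d = '"' then '"' :: replEsc rest
    else c :: replEsc (d :: rest)

-- hand port of Python '\\'.join(...): exact
def joinBS : List (List Char) → List Char
  | [] => []
  | [s] => s
  | s :: t :: ss => s ++ '\\' :: joinBS (t :: ss)

def unquote_attr_alt (value : String) : String :=
  let cs := value.toList
  if cs = [] then ""
  else if PySem.Chars.startswith cs ['"'] && PySem.Chars.endswith cs ['"'] then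
    String.ofList (joinBS ((splitBB (PySem.List.slice cs (some 1) (some (-1)))).map replEsc))
  else value

-- ===== PRECONDITION & SPEC =====
def Spec_unquote_attr (value : String) (out : String) : Prop := out = unquote_attr_alt value
instance (value : String) (out : String) : Decidable (Spec_unquote_attr value out) := by unfold Spec_unquote_attr; infer_instance

-- ===== CLAIM (what is proved, stated in full; the proofs are below) =====
def Claim_equal_unquote_attr : Prop := ∀ (value : String), Dom_unquote_attr value → Spec_unquote_attr value (unquote_attr value)

-- ===== LEMMAS AND PROOFS =====

-- proof-side reference recursion (structural two-char pairing, = A's loop)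
def unqRec : List Char → List Char
  | [] => []
  | [c] => [c]
  | c :: d :: rest =>
    if c = '\\' then (if d = '"' ∨ d = '\\' then [d] else ['\\', d]) ++ unqRec rest
    else c :: unqRec (d :: rest)

-- proof-side name for B's pipeline
def G (l : List Char) : List Char := joinBS ((splitBB l).map replEsc)

lemma unqRec_cons_ne (c : Char) (rest : List Char) (hc : c ≠ '\\') :
    unqRec (c :: rest) = c :: unqRec rest := by
  cases rest <;> simp [unqRec, hc]

lemma unqRec_bs_cons (d : Char) (rest : List Char) :
    unqRec ('\\' :: d :: rest) = (if d = '"' ∨ d = '\\' then [d] else ['\\', d]) ++ unqRec rest := by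
  simp [unqRec]

lemma unquoteLoopA_eq_unqRec (inner : List Char) (i : Nat) :
    unquoteLoopA inner i = unqRec (inner.drop i) := by
  rw [unquoteLoopA]
  split
  · rename_i h
    have hdrop : inner.drop i = inner[i] :: inner.drop (i+1) :=
      List.drop_eq_getElem_cons h
    split
    · rename_i h2
      have hdrop2 : inner.drop (i+1) = inner[i+1] :: inner.drop (i+2) :=
        List.drop_eq_getElem_cons h2.2
      rw [hdrop, hdrop2, h2.1, unqRec_bs_cons, unquoteLoopA_eq_unqRec inner (i+2)]
      by_cases hq : inner[i+1] = '"'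
      · simp [hq]
      · by_cases hb : inner[i+1] = '\\' <;> simp [hq, hb]
    · rename_i h2
      rw [hdrop, unquoteLoopA_eq_unqRec inner (i+1)]
      by_cases hc : inner[i] = '\\'
      · have hl : ¬ i + 1 < inner.length := fun hlt => h2 ⟨hc, hlt⟩
        have hnil : inner.drop (i+1) = [] := List.drop_eq_nil_of_le (by omega)
        simp [hc, hnil, unqRec]
      · rw [unqRec_cons_ne _ _ hc]
  · rename_i h
    rw [List.drop_eq_nil_of_le (by omega)]
    rfl
termination_by inner.length - i

lemma splitBB_ne_nil (l : List Char) : splitBB l ≠ [] := by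
  match l with
  | [] => simp [splitBB]
  | [c] => simp [splitBB]
  | c :: d :: rest =>
    rw [splitBB]
    split
    · simp
    · cases splitBB (d :: rest) <;> simp

lemma splitBB_cons_ne (c : Char) (l : List Char) (hc : c ≠ '\\') :
    splitBB (c :: l) =
      match splitBB l with
      | [] => [[c]]
      | s :: ss => (c :: s) :: ss := by
  cases l with
  | nil => simp [splitBB]
  | cons d rest => rw [splitBB]; simp [hc]

lemma replEsc_cons_ne (c : Char) (l : List Char) (hc : c ≠ '\\') :
    replEsc (c :: l) = c :: replEsc l := by
  cases l <;> simp [replEsc, hc]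

lemma joinBS_cons_head (c : Char) (t : List Char) (ts : List (List Char)) :
    joinBS ((c :: t) :: ts) = c :: joinBS (t :: ts) := by
  cases ts <;> simp [joinBS]

lemma G_cons_ne (c : Char) (l : List Char) (hc : c ≠ '\\') :
    G (c :: l) = c :: G l := by
  unfold G
  rw [splitBB_cons_ne c l hc]
  cases h : splitBB l with
  | nil => exact absurd h (splitBB_ne_nil l)
  | cons s ss =>
    simp only [List.map_cons]
    rw [replEsc_cons_ne c s hc, joinBS_cons_head]

lemma G_bsbs (rest : List Char) : G ('\\' :: '\\' :: rest) = '\\' :: G rest := by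
  unfold G
  rw [splitBB]
  cases h : splitBB rest with
  | nil => exact absurd h (splitBB_ne_nil rest)
  | cons s ss => simp [joinBS, replEsc]

lemma G_bsq (rest : List Char) : G ('\\' :: '"' :: rest) = '"' :: G rest := by
  unfold G
  rw [splitBB]
  have hne : ¬ (('\\' : Char) = '\\' ∧ ('"' : Char) = '\\') := by decide
  rw [if_neg hne, splitBB_cons_ne '"' rest (by decide)]
  cases h : splitBB rest with
  | nil => exact absurd h (splitBB_ne_nil rest)
  | cons s ss =>
    simp only [List.map_cons]
    have : replEsc ('\\' :: '"' :: s) = '"' :: replEsc s := by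
      rw [replEsc]; simp
    rw [this, joinBS_cons_head]

lemma G_bsd (d : Char) (rest : List Char) (hq : d ≠ '"') (hb : d ≠ '\\') :
    G ('\\' :: d :: rest) = '\\' :: d :: G rest := by
  unfold G
  rw [splitBB]
  have hne : ¬ (('\\' : Char) = '\\' ∧ d = '\\') := fun h => hb h.2
  rw [if_neg hne, splitBB_cons_ne d rest hb]
  cases h : splitBB rest with
  | nil => exact absurd h (splitBB_ne_nil rest)
  | cons s ss =>
    simp only [List.map_cons]
    have : replEsc ('\\' :: d :: s) = '\\' :: d :: replEsc s := by
      rw [replEsc]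
      rw [if_neg (fun h => hq h.2), replEsc_cons_ne d s hb]
    rw [this, joinBS_cons_head, joinBS_cons_head]

lemma unqRec_eq_G (l : List Char) : unqRec l = G l := by
  match l with
  | [] => simp [unqRec, G, splitBB, replEsc, joinBS]
  | [c] => simp [unqRec, G, splitBB, replEsc, joinBS]
  | c :: d :: rest =>
    have ih1 : unqRec rest = G rest := unqRec_eq_G rest
    have ih2 : unqRec (d :: rest) = G (d :: rest) := unqRec_eq_G (d :: rest)
    by_cases hc : c = '\\'
    · subst hc
      rw [unqRec_bs_cons]
      by_cases hq : d = '"'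
      · subst hq; simp only [true_or, if_pos]; rw [G_bsq, ih1]; rfl
      · by_cases hb : d = '\\'
        · subst hb; simp only [or_true, if_pos]; rw [G_bsbs, ih1]; rfl
        · rw [if_neg (by simp [hq, hb]), G_bsd d rest hq hb, ih1]; rfl
    · rw [unqRec_cons_ne c _ hc, G_cons_ne c _ hc, ih2]
termination_by l.length

-- ===== VERDICT (by name: the statement is the Claim_ definition above) =====
theorem unquote_attr_spec : Claim_equal_unquote_attr := by
  intro value _
  unfold Spec_unquote_attr unquote_attr unquote_attr_alt
  set cs := value.toList with hcs
  by_cases hnil : cs = []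
  · simp [hnil]
  · simp only [hnil, if_false]
    by_cases hq : PySem.Chars.startswith cs ['"'] && PySem.Chars.endswith cs ['"']
    · simp only [hq, if_true]
      congr 1
      rw [unquoteLoopA_eq_unqRec, List.drop_zero, unqRec_eq_G]
      rfl
    · simp [hq]
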